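-- pv_equiv track=rewrite | github.com/AlbionDraig/HackerRankScripts | Maximum Cost of Laptop Count.py | maxCost
-- ===== SOURCE A (Python) =====
-- def maxCost(cost, labels, dailyCount):
--     #Process
--     ans = 0
--     currCost = 0
--     currCount = 0
--     for c, l in zip(cost,labels):
--         currCost +=c
--         if l == "illegal":
--             continue
--         currCount += 1
--         if currCount == dailyCount:
--             ans = max(ans,currCost)
--             currCost = 0
--             currCount = 0
--     return ans
-- ===== SOURCE B (Python) =====
-- def maxCost(cost, labels, dailyCount):
--     if dailyCount <= 0:
--         return 0
--     best = 0
--     pairs = list(zip(cost, labels))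
--     while pairs:
--         # consume one complete window of dailyCount legal laptops
--         total = 0
--         need = dailyCount
--         i = 0
--         while i < len(pairs) and need > 0:
--             c, l = pairs[i]
--             total += c
--             if l != "illegal":
--                 need -= 1
--             i += 1
--         if need > 0:
--             break  # incomplete trailing window: discard
--         if total > best:
--             best = total
--         pairs = pairs[i:]
--     return best
-- ===== Notes on version B (the rewrite author's own statement) =====
-- stated objective: alternative
-- what changed: B guards dailyCount<=0 up front and peels one complete window at a time (nested loop: a countdown inner scan that consumes the window, then slicing off the consumed prefix), instead of A's single pass with count-up-and-reset state.
import Mathlib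
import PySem

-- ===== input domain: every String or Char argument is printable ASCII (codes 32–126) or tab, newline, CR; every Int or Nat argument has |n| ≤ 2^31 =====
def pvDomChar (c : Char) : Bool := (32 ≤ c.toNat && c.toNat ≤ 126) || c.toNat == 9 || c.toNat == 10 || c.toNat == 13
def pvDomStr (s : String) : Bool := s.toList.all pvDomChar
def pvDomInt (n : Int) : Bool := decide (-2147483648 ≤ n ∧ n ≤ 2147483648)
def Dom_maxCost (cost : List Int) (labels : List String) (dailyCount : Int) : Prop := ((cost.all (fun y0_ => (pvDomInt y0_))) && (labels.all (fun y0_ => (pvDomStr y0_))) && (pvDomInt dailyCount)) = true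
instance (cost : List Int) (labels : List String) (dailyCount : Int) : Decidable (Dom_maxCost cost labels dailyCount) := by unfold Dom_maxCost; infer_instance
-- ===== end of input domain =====

-- B peels one complete window at a time with a countdown inner scan (alternative decomposition of the same O(n) pass); return-value equivalence proved on all inputs.


-- ===== PORT A =====
-- one fold over zip(cost,labels) with state (ans, currCost, currCount), exactly A's loop
def maxCostStepA (dailyCount : Int) (st : Int × Int × Int) (p : Int × String) : Int × Int × Int :=
  let currCost := st.2.1 + p.1
  if p.2 = "illegal" then (st.1, currCost, st.2.2)
  else if st.2.2 + 1 = dailyCount then (max st.1 currCost, 0, 0)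
  else (st.1, currCost, st.2.2 + 1)

def maxCost (cost : List Int) (labels : List String) (dailyCount : Int) : Int :=
  ((List.zip cost labels).foldl (maxCostStepA dailyCount) (0, 0, 0)).1

-- ===== PORT B =====
-- inner while-loop of Source B: consume elements while need > 0; returns (total, need, remaining pairs)
def consumeAlt (need total : Int) : List (Int × String) → Int × Int × List (Int × String)
  | [] => (total, need, [])
  | (c, l) :: t =>
      if need > 0 then
        consumeAlt (if l ≠ "illegal" then need - 1 else need) (total + c) t
      else (total, need, (c, l) :: t)

-- outer while-loop of Source B; the Nat argument is fuel (= initial list length) making the loop total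
def loopAlt (dailyCount : Int) : Nat → List (Int × String) → Int → Int
  | 0, _, best => best
  | _ + 1, [], best => best
  | n + 1, p :: t, best =>
      let r := consumeAlt dailyCount 0 (p :: t)
      if r.2.1 > 0 then best
      else loopAlt dailyCount n r.2.2 (if r.1 > best then r.1 else best)

def maxCost_alt (cost : List Int) (labels : List String) (dailyCount : Int) : Int :=
  if dailyCount ≤ 0 then 0
  else loopAlt dailyCount (List.zip cost labels).length (List.zip cost labels) 0

-- ===== PRECONDITION & SPEC =====
def Spec_maxCost (cost : List Int) (labels : List String) (dailyCount : Int) (out : Int) : Prop := out = maxCost_alt cost labels dailyCount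
instance (cost : List Int) (labels : List String) (dailyCount : Int) (out : Int) : Decidable (Spec_maxCost cost labels dailyCount out) := by unfold Spec_maxCost; infer_instance

-- ===== CLAIM (what is proved, stated in full; the proofs are below) =====
def Claim_equal_maxCost : Prop := ∀ (cost : List Int) (labels : List String) (dailyCount : Int), Dom_maxCost cost labels dailyCount → Spec_maxCost cost labels dailyCount (maxCost cost labels dailyCount)

-- ===== LEMMAS AND PROOFS =====

-- with dailyCount ≤ 0, A never completes a window (currCount+1 ≥ 1 > dailyCount)
theorem foldA_nonpos (d : Int) (hd : d ≤ 0) :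
    ∀ (ps : List (Int × String)) (ans cc cn : Int), 0 ≤ cn →
      ((ps.foldl (maxCostStepA d) (ans, cc, cn)).1 = ans) := by
  intro ps
  induction ps with
  | nil => intro ans cc cn _; simp [List.foldl]
  | cons p t ih =>
      intro ans cc cn hcn
      simp only [List.foldl, maxCostStepA]
      by_cases hl : p.2 = "illegal"
      · simp [hl]; exact ih ans _ cn hcn
      · have hne : ¬ (cn + 1 = d) := by omega
        simp [hl, hne]
        exact ih ans _ (cn + 1) (by omega)

-- consumeAlt with exhausted need returns its input unchanged
theorem consumeAlt_nonpos (need total : Int) (ps : List (Int × String)) (h : ¬ need > 0) :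
    consumeAlt need total ps = (total, need, ps) := by
  cases ps with
  | nil => rfl
  | cons p t => obtain ⟨c, l⟩ := p; simp [consumeAlt, h]

-- one step of consumeAlt with positive need
theorem consumeAlt_step (need total c : Int) (l : String) (t : List (Int × String)) (h : need > 0) :
    consumeAlt need total ((c, l) :: t)
      = consumeAlt (if l ≠ "illegal" then need - 1 else need) (total + c) t := by
  simp [consumeAlt, h]

-- the rest returned by consumeAlt is never longer than the input
theorem consumeAlt_rest_le :
    ∀ (ps : List (Int × String)) (need total : Int),
      (consumeAlt need total ps).2.2.length ≤ ps.length := by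
  intro ps
  induction ps with
  | nil => intro need total; simp [consumeAlt]
  | cons p t ih =>
      intro need total
      obtain ⟨c, l⟩ := p
      simp only [consumeAlt]
      by_cases h : need > 0
      · simp only [h, if_true]
        exact le_trans (ih _ _) (by simp)
      · simp [h]

-- A's fold across one (possibly incomplete) window matches consumeAlt
theorem foldA_window (d : Int) :
    ∀ (ps : List (Int × String)) (ans cc cn : Int), cn < d →
      (if (consumeAlt (d - cn) cc ps).2.1 > 0
       then (ps.foldl (maxCostStepA d) (ans, cc, cn)).1 = ans
       else ps.foldl (maxCostStepA d) (ans, cc, cn)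
              = (consumeAlt (d - cn) cc ps).2.2.foldl (maxCostStepA d)
                  (max ans (consumeAlt (d - cn) cc ps).1, 0, 0)) := by
  intro ps
  induction ps with
  | nil =>
      intro ans cc cn hcn
      simp [consumeAlt, List.foldl]
      omega
  | cons p t ih =>
      intro ans cc cn hcn
      obtain ⟨c, l⟩ := p
      have hpos : d - cn > 0 := by omega
      rw [consumeAlt_step _ _ _ _ _ hpos]
      simp only [List.foldl, maxCostStepA]
      by_cases hl : l = "illegal"
      · have h1 : ¬ (l ≠ "illegal") := by simp [hl]
        rw [if_neg h1]
        simp only [hl]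
        exact ih ans (cc + c) cn hcn
      · have h1 : (l ≠ "illegal") := hl
        rw [if_pos h1]
        simp only [if_neg hl]
        by_cases hdone : cn + 1 = d
        · have hz : ¬ (d - cn - 1 > 0) := by omega
          rw [consumeAlt_nonpos _ _ _ hz]
          have hz2 : ¬ ((cc + c, d - cn - 1, t) : Int × Int × List (Int × String)).2.1 > 0 := hz
          rw [if_pos hdone, if_neg hz2]
        · have heq : d - cn - 1 = d - (cn + 1) := by ring
          rw [if_neg hdone, heq]
          exact ih ans (cc + c) (cn + 1) (by omega)

-- main invariant: with d > 0 and enough fuel, A's fold from a fresh window state equals B's outer loop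
theorem foldA_loopAlt (d : Int) (hd : 0 < d) :
    ∀ (fuel : Nat) (ps : List (Int × String)) (ans : Int), ps.length ≤ fuel →
      (ps.foldl (maxCostStepA d) (ans, 0, 0)).1 = loopAlt d fuel ps ans := by
  intro fuel
  induction fuel with
  | zero =>
      intro ps ans h
      have : ps = [] := List.eq_nil_of_length_eq_zero (Nat.le_zero.mp h)
      subst this; simp [loopAlt, List.foldl]
  | succ n ih =>
      intro ps ans h
      rcases ps with _ | ⟨p, t⟩
      · simp [loopAlt, List.foldl]
      · have hw := foldA_window d (p :: t) ans 0 0 hd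
        simp only [sub_zero] at hw
        simp only [loopAlt]
        by_cases hneed : (consumeAlt d 0 (p :: t)).2.1 > 0
        · rw [if_pos hneed] at hw ⊢
          exact hw
        · rw [if_neg hneed] at hw ⊢
          rw [hw]
          have hrest : (consumeAlt d 0 (p :: t)).2.2.length ≤ n := by
            obtain ⟨c, l⟩ := p
            rw [consumeAlt_step _ _ _ _ _ hd]
            have h2 := consumeAlt_rest_le t (if l ≠ "illegal" then d - 1 else d) (0 + c)
            have h3 : t.length ≤ n := by simpa using Nat.succ_le_succ_iff.mp h
            omega
          have hmax : max ans (consumeAlt d 0 (p :: t)).1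
              = (if (consumeAlt d 0 (p :: t)).1 > ans then (consumeAlt d 0 (p :: t)).1 else ans) := by
            split <;> omega
          rw [hmax]
          exact ih _ _ hrest

-- ===== VERDICT (by name: the statement is the Claim_ definition above) =====
theorem maxCost_spec : Claim_equal_maxCost := by
  intro cost labels d _
  unfold Spec_maxCost maxCost maxCost_alt
  by_cases hd : d ≤ 0
  · simp only [hd, if_true]
    exact foldA_nonpos d hd (List.zip cost labels) 0 0 0 le_rfl
  · simp only [hd, if_false]
    exact foldA_loopAlt d (by omega) _ _ 0 le_rfl
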